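-- pv_equiv track=rewrite | github.com/belkinot/DRESS-BA | new_dress_implementation.py | check_ml_constraints
-- ===== SOURCE A (Python) =====
-- def check_ml_constraints(constraints, clustering):
--     """Prüft wie viele ML-Constraints erfüllt sind"""
--     # Annahme: Clustering ist eine Liste von Listen mit Indizes ((1,2,5), (3,4), (6,9), (7,8))
--     constraint_sat = 0
--
--     for constraint in constraints:
--         for key in clustering:
--             if constraint[0] in clustering[key]:
--                 if constraint[1] in clustering[key]:
--                     constraint_sat += 1
--
--     return constraint_sat
-- ===== SOURCE B (Python) =====
-- def check_ml_constraints(constraints, clustering):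
--     """Prüft wie viele ML-Constraints erfüllt sind"""
--     # Inverted index: point -> set of cluster keys containing it (one pass over clustering),
--     # then each constraint is a set-intersection lookup instead of a rescan of all clusters.
--     index = {}
--     for key in clustering:
--         for point in clustering[key]:
--             index.setdefault(point, set()).add(key)
--     total = 0
--     for constraint in constraints:
--         total += len(index.get(constraint[0], set()) & index.get(constraint[1], set()))
--     return total
-- ===== Notes on version B (the rewrite author's own statement) =====
-- stated objective: faster
-- what changed: Instead of rescanning every cluster for every constraint, B builds an inverted index (point -> set of cluster keys) in one pass over the clustering and answers each constraint by the size of the intersection of two indexed key sets.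
import Mathlib
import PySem

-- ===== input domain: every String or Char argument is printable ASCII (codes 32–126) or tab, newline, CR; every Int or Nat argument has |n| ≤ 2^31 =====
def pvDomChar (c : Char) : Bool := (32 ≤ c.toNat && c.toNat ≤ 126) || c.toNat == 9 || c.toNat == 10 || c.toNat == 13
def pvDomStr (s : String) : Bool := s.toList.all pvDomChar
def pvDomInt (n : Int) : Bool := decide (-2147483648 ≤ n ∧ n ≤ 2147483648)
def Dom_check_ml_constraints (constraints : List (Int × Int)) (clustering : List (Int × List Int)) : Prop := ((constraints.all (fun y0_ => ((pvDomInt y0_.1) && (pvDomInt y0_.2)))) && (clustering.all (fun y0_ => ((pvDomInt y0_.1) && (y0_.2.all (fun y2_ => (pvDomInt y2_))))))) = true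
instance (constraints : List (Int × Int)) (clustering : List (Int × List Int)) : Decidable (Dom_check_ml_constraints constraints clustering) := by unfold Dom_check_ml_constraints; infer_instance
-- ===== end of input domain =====

-- B replaces A's per-constraint rescan of all clusters by a one-pass inverted index
-- (point -> set of cluster keys) queried by set intersection; measurably faster on large inputs.


-- ===== PORT A =====
def check_ml_constraints (constraints : List (Int × Int)) (clustering : List (Int × List Int)) : Int :=
  constraints.foldl (fun constraint_sat constraint =>
    clustering.foldl (fun acc kv =>
      if (PySem.Dict.getD (PySem.Dict.mk clustering) kv.1 []).contains constraint.1 then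
        if (PySem.Dict.getD (PySem.Dict.mk clustering) kv.1 []).contains constraint.2 then acc + 1
        else acc
      else acc) constraint_sat) 0

-- ===== PORT B =====
-- index.setdefault(point, set()).add(key), entry by entry
def pvIndex (clustering : List (Int × List Int)) : PySem.Dict Int (PySem.Set Int) :=
  clustering.foldl (fun d kv =>
    kv.2.foldl (fun d point =>
      PySem.Dict.modify d point PySem.Set.empty (fun s => PySem.Set.add s kv.1)) d)
    PySem.Dict.empty

def check_ml_constraints_alt (constraints : List (Int × Int)) (clustering : List (Int × List Int)) : Int :=
  constraints.foldl (fun total constraint =>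
    total + ((PySem.Set.inter (PySem.Dict.getD (pvIndex clustering) constraint.1 PySem.Set.empty)
                              (PySem.Dict.getD (pvIndex clustering) constraint.2 PySem.Set.empty)).length : Int)) 0

-- ===== PRECONDITION & SPEC =====
-- Pre_ excludes association lists with duplicate cluster keys: such inputs cannot arise from the
-- Python dict argument (dict keys are unique), so the duplicate-key behaviour of the assoc-list
-- representation is unspecified.
def Pre_check_ml_constraints (constraints : List (Int × Int)) (clustering : List (Int × List Int)) : Prop :=
  (clustering.map Prod.fst).Nodup

instance (constraints : List (Int × Int)) (clustering : List (Int × List Int)) : Decidable (Pre_check_ml_constraints constraints clustering) := by unfold Pre_check_ml_constraints; infer_instance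

def pvWitness_check_ml_constraints : (List (Int × Int)) × (List (Int × List Int)) :=
  ([(1, 2), (3, 4)], [(0, [1, 2, 5]), (1, [3, 4])])

def Spec_check_ml_constraints (constraints : List (Int × Int)) (clustering : List (Int × List Int)) (out : Int) : Prop := out = check_ml_constraints_alt constraints clustering
instance (constraints : List (Int × Int)) (clustering : List (Int × List Int)) (out : Int) : Decidable (Spec_check_ml_constraints constraints clustering out) := by unfold Spec_check_ml_constraints; infer_instance

-- ===== CLAIM (what is proved, stated in full; the proofs are below) =====
def Claim_equal_check_ml_constraints : Prop := ∀ (constraints : List (Int × Int)) (clustering : List (Int × List Int)), Dom_check_ml_constraints constraints clustering → Pre_check_ml_constraints constraints clustering → Spec_check_ml_constraints constraints clustering (check_ml_constraints constraints clustering)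

-- ===== LEMMAS AND PROOFS =====

-- the cluster keys whose member list contains p, in clustering order
def pvKeysWith (clustering : List (Int × List Int)) (p : Int) : List Int :=
  (clustering.filter (fun kv => kv.2.contains p)).map Prod.fst

-- A's dict lookup of an iterated key returns that entry's value when keys are distinct
theorem pv_mk_get (l : List (Int × List Int)) (h : (l.map Prod.fst).Nodup) :
    ∀ kv ∈ l, PySem.Dict.getD (PySem.Dict.mk l) kv.1 [] = kv.2 := by
  induction l with
  | nil => intro kv hm; cases hm
  | cons hd tl ih =>
    simp only [List.map_cons, List.nodup_cons] at h
    intro kv hm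
    simp only [PySem.Dict.getD, PySem.Dict.get?, List.find?_cons]
    rcases List.mem_cons.mp hm with rfl | hm
    · simp
    · have hne : hd.1 ≠ kv.1 := fun e => h.1 (e ▸ List.mem_map_of_mem hm)
      have hb : (hd.1 == kv.1) = false := by simp [hne]
      simp only [hb]
      simpa [PySem.Dict.getD, PySem.Dict.get?] using ih h.2 kv hm

-- effect of one cluster's inner loop on the index
theorem pv_inner (ps : List Int) (k : Int) (d : PySem.Dict Int (PySem.Set Int)) (q : Int) :
    PySem.Dict.getD
      (ps.foldl (fun d point => PySem.Dict.modify d point PySem.Set.empty (fun s => PySem.Set.add s k)) d)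
      q []
    = if q ∈ ps ∧ k ∉ PySem.Dict.getD d q ([] : PySem.Set Int)
      then PySem.Dict.getD d q [] ++ [k]
      else PySem.Dict.getD d q [] := by
  induction ps generalizing d with
  | nil => simp
  | cons p ps ih =>
    rw [List.foldl_cons, ih]
    have hg : ∀ r : Int,
        PySem.Dict.getD (PySem.Dict.modify d p PySem.Set.empty (fun s => PySem.Set.add s k)) r ([] : PySem.Set Int)
        = if r = p then PySem.Set.add (PySem.Dict.getD d p PySem.Set.empty) k
          else PySem.Dict.getD d r [] := by
      intro r
      simp [PySem.Dict.modify, PySem.Dict.getD_insert]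
    simp only [hg]
    by_cases hqp : q = p
    · subst hqp
      by_cases hk : k ∈ PySem.Dict.getD d q ([] : PySem.Set Int)
      · have hc : (PySem.Dict.getD d q ([] : PySem.Set Int)).contains k = true := by
          simpa [List.contains_eq_mem] using hk
        simp [PySem.Set.add, hc, hk]
      · have hc : (PySem.Dict.getD d q ([] : PySem.Set Int)).contains k = false := by
          simpa [List.contains_eq_mem] using hk
        simp [PySem.Set.add, hc, hk]
    · simp [hqp]

-- building the whole index: each point maps to the keys of the clusters containing it
theorem pv_build (l : List (Int × List Int)) (d : PySem.Dict Int (PySem.Set Int))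
    (hnd : (l.map Prod.fst).Nodup)
    (hfresh : ∀ kv ∈ l, ∀ q : Int, kv.1 ∉ PySem.Dict.getD d q ([] : PySem.Set Int)) (q : Int) :
    PySem.Dict.getD
      (l.foldl (fun d kv =>
        kv.2.foldl (fun d point => PySem.Dict.modify d point PySem.Set.empty (fun s => PySem.Set.add s kv.1)) d) d)
      q []
    = PySem.Dict.getD d q [] ++ pvKeysWith l q := by
  induction l generalizing d with
  | nil => simp [pvKeysWith]
  | cons kv tl ih =>
    simp only [List.map_cons, List.nodup_cons] at hnd
    simp only [List.foldl_cons]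
    set d' := kv.2.foldl (fun d point => PySem.Dict.modify d point PySem.Set.empty (fun s => PySem.Set.add s kv.1)) d with hd'
    have hgd' : ∀ r : Int, PySem.Dict.getD d' r ([] : PySem.Set Int)
        = if r ∈ kv.2 then PySem.Dict.getD d r [] ++ [kv.1]
          else PySem.Dict.getD d r [] := by
      intro r
      rw [hd', pv_inner]
      have hf := hfresh kv List.mem_cons_self r
      simp [hf]
    have hfresh' : ∀ kv' ∈ tl, ∀ r : Int, kv'.1 ∉ PySem.Dict.getD d' r ([] : PySem.Set Int) := by
      intro kv' hkv' r
      have h1 : kv'.1 ∉ PySem.Dict.getD d r ([] : PySem.Set Int) := hfresh kv' (List.mem_cons_of_mem _ hkv') r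
      have h2 : kv'.1 ≠ kv.1 := fun e => hnd.1 (e ▸ List.mem_map_of_mem hkv')
      rw [hgd' r]
      by_cases hc : r ∈ kv.2 <;> simp [hc, h1, h2]
    rw [ih d' hnd.2 hfresh', hgd' q]
    by_cases hc : q ∈ kv.2 <;>
      simp [pvKeysWith, List.contains_eq_mem, hc]

theorem pv_index_getD (clustering : List (Int × List Int))
    (hnd : (clustering.map Prod.fst).Nodup) (q : Int) :
    PySem.Dict.getD (pvIndex clustering) q PySem.Set.empty = pvKeysWith clustering q := by
  have h := pv_build clustering PySem.Dict.empty hnd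
    (by intro kv _ r; simp [PySem.Dict.getD, PySem.Dict.get?, PySem.Dict.empty]) q
  have he : PySem.Dict.getD (PySem.Dict.empty : PySem.Dict Int (PySem.Set Int)) q [] = [] := by
    simp [PySem.Dict.getD, PySem.Dict.get?, PySem.Dict.empty]
  rw [he, List.nil_append] at h
  exact h

-- membership of a key in an indexed key list decides whether its own cluster holds the point
theorem pv_key_mem (l : List (Int × List Int)) (hnd : (l.map Prod.fst).Nodup)
    (kv : Int × List Int) (hkv : kv ∈ l) (b : Int) :
    (pvKeysWith l b).contains kv.1 = kv.2.contains b := by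
  by_cases hb : b ∈ kv.2
  · have hm : kv.1 ∈ pvKeysWith l b :=
      List.mem_map_of_mem (List.mem_filter.mpr ⟨hkv, by simpa [List.contains_eq_mem] using hb⟩)
    simp [List.contains_eq_mem, hb, hm]
  · have hm : kv.1 ∉ pvKeysWith l b := by
      intro hcon
      rw [pvKeysWith, List.mem_map] at hcon
      obtain ⟨kv', hkv', he⟩ := hcon
      have hkv'l := (List.mem_filter.mp hkv').1
      have heq := List.inj_on_of_nodup_map hnd hkv'l hkv he
      subst heq
      have hc2 := (List.mem_filter.mp hkv').2
      rw [List.contains_eq_mem] at hc2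
      exact hb (by simpa using hc2)
    simp [List.contains_eq_mem, hb, hm]

-- the intersection of two indexed key sets counts the clusters containing both points
theorem pv_inter_count (l : List (Int × List Int)) (hnd : (l.map Prod.fst).Nodup) (a b : Int) :
    (PySem.Set.inter (pvKeysWith l a) (pvKeysWith l b)).length
    = l.countP (fun kv => kv.2.contains a && kv.2.contains b) := by
  rw [List.countP_eq_length_filter]
  simp only [PySem.Set.inter, PySem.Set.contains]
  rw [show pvKeysWith l a = (l.filter (fun kv => kv.2.contains a)).map Prod.fst from rfl,
      List.filter_map, List.filter_filter]
  rw [List.length_map]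
  congr 1
  apply List.filter_congr
  intro kv hkv
  have hkm := pv_key_mem l hnd kv hkv b
  rw [Function.comp_apply, hkm]
  exact Bool.and_comm _ _

-- ===== VERDICT (by name: the statement is the Claim_ definition above) =====
theorem check_ml_constraints_spec : Claim_equal_check_ml_constraints := by
  intro constraints clustering _ hpre
  unfold Spec_check_ml_constraints check_ml_constraints check_ml_constraints_alt
  have hA : ∀ (acc : Int), ∀ c ∈ constraints,
      clustering.foldl (fun acc kv =>
        if (PySem.Dict.getD (PySem.Dict.mk clustering) kv.1 []).contains c.1 then
          if (PySem.Dict.getD (PySem.Dict.mk clustering) kv.1 []).contains c.2 then acc + 1 else acc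
        else acc) acc
      = acc + (clustering.countP (fun kv => kv.2.contains c.1 && kv.2.contains c.2) : Int) := by
    intro acc c _
    rw [PySem.List.foldl_congr_mem clustering _
      (fun acc kv => if (kv.2.contains c.1 && kv.2.contains c.2) then acc + 1 else acc) acc ?_]
    · exact PySem.List.foldl_if_add_one _ clustering acc
    · intro acc2 kv hkv
      rw [pv_mk_get clustering hpre kv hkv]
      by_cases h1 : c.1 ∈ kv.2 <;> by_cases h2 : c.2 ∈ kv.2 <;>
        simp [List.contains_eq_mem, h1, h2]
  have hB : ∀ (acc : Int), ∀ c ∈ constraints,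
      acc + ((PySem.Set.inter (PySem.Dict.getD (pvIndex clustering) c.1 PySem.Set.empty)
                              (PySem.Dict.getD (pvIndex clustering) c.2 PySem.Set.empty)).length : Int)
      = acc + (clustering.countP (fun kv => kv.2.contains c.1 && kv.2.contains c.2) : Int) := by
    intro acc c _
    rw [pv_index_getD clustering hpre, pv_index_getD clustering hpre,
      pv_inter_count clustering hpre c.1 c.2]
  rw [PySem.List.foldl_congr_mem constraints _
    (fun acc c => acc + (clustering.countP (fun kv => kv.2.contains c.1 && kv.2.contains c.2) : Int)) 0 hA]
  rw [PySem.List.foldl_congr_mem constraints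
    (fun total c => total + ((PySem.Set.inter (PySem.Dict.getD (pvIndex clustering) c.1 PySem.Set.empty)
                              (PySem.Dict.getD (pvIndex clustering) c.2 PySem.Set.empty)).length : Int))
    (fun acc c => acc + (clustering.countP (fun kv => kv.2.contains c.1 && kv.2.contains c.2) : Int)) 0 hB]
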